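-- pv_equiv track=rewrite | github.com/pixelligue/distiq-code | src/distiq_code/agents/__init__.py | _parse_agents_md
-- ===== SOURCE A (Python) =====
-- def _parse_agents_md(content: str) -> dict[str, list[str]]:
--     """Parse AGENTS.md content."""
--     instructions: dict[str, list[str]] = {
--         "build": [],
--         "plan": [],
--         "all": [],
--     }
--
--     current_section = "all"
--
--     for line in content.split("\n"):
--         line = line.strip()
--
--         # Section headers
--         if line.lower().startswith("## build"):
--             current_section = "build"
--         elif line.lower().startswith("## plan"):
--             current_section = "plan"
--         elif line.startswith("## "):
--             current_section = "all"
--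
--         # Instruction lines
--         elif line.startswith("- ") or line.startswith("* "):
--             instruction = line[2:].strip()
--             if instruction:
--                 instructions[current_section].append(instruction)
--
--     # Merge "all" into both agents
--     instructions["build"] = instructions["all"] + instructions["build"]
--     instructions["plan"] = instructions["all"] + instructions["plan"]
--
--     return instructions
-- ===== SOURCE B (Python) =====
-- def _parse_agents_md(content: str) -> dict[str, list[str]]:
--     """Parse AGENTS.md content: label each line with its section, then filter bullets per section."""
--     lines = [l.strip() for l in content.split("\n")]
--
--     def header_label(line):
--         low = line.lower()
--         if low.startswith("## build"):
--             return "build"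
--         if low.startswith("## plan"):
--             return "plan"
--         if line.startswith("## "):
--             return "all"
--         return None
--
--     labels = []
--     cur = "all"
--     for line in lines:
--         h = header_label(line)
--         if h is not None:
--             cur = h
--             labels.append(None)
--         else:
--             labels.append(cur)
--
--     def bullets(sec):
--         out = []
--         for lab, line in zip(labels, lines):
--             if lab == sec and (line.startswith("- ") or line.startswith("* ")) and line[2:].strip():
--                 out.append(line[2:].strip())
--         return out
--
--     alls = bullets("all")
--     return {"build": alls + bullets("build"), "plan": alls + bullets("plan"), "all": alls}
-- ===== Notes on version B (the rewrite author's own statement) =====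
-- stated objective: alternative
-- what changed: A's single interleaved state-machine loop that appends into a three-key dict is replaced by a grouping pass that labels every line with its section followed by independent per-section bullet-filter passes, merged at the end.
import Mathlib
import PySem

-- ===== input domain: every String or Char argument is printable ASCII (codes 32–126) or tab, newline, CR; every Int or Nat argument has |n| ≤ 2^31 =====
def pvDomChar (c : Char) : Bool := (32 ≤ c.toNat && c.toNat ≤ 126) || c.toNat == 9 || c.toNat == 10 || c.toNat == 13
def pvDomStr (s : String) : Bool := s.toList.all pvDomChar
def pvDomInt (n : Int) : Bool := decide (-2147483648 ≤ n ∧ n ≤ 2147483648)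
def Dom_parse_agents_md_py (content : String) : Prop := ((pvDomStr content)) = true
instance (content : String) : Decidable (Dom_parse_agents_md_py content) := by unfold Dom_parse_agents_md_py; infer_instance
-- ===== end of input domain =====

-- B replaces A's single interleaved state-machine dict loop by a per-line section-labeling pass
-- followed by three independent bullet-filter passes (objective: alternative decomposition, same cost).

-- ===== PORT A =====
def pvA_step (st : PySem.Dict String (List String) × String) (line0 : String) :
    PySem.Dict String (List String) × String :=
  let line := PySem.Str.strip line0
  if PySem.Str.startswith (PySem.Str.lower line) "## build" then (st.1, "build")
  else if PySem.Str.startswith (PySem.Str.lower line) "## plan" then (st.1, "plan")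
  else if PySem.Str.startswith line "## " then (st.1, "all")
  else if PySem.Str.startswith line "- " || PySem.Str.startswith line "* " then
    let instruction := PySem.Str.strip (PySem.Str.slice line (some 2) none)
    if instruction ≠ "" then (st.1.modify st.2 [] (· ++ [instruction]), st.2)
    else st
  else st

def parse_agents_md_py (content : String) : List (String × List String) :=
  let instructions : PySem.Dict String (List String) :=
    PySem.Dict.ofList [("build", []), ("plan", []), ("all", [])]
  let res := ((PySem.Str.split? content "\n").getD []).foldl pvA_step (instructions, "all")
  let d := res.1
  let d := d.insert "build" (d.getD "all" [] ++ d.getD "build" [])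
  let d := d.insert "plan" (d.getD "all" [] ++ d.getD "plan" [])
  d.items

-- ===== PORT B =====
def pvB_headerLabel (line : String) : Option String :=
  if PySem.Str.startswith (PySem.Str.lower line) "## build" then some "build"
  else if PySem.Str.startswith (PySem.Str.lower line) "## plan" then some "plan"
  else if PySem.Str.startswith line "## " then some "all"
  else none

def pvB_labelStep (st : List (Option String) × String) (line : String) :
    List (Option String) × String :=
  match pvB_headerLabel line with
  | some h => (st.1 ++ [none], h)
  | none => (st.1 ++ [some st.2], st.2)

def pvB_isBullet (sec : String) (p : Option String × String) : Bool :=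
  p.1 == some sec && (PySem.Str.startswith p.2 "- " || PySem.Str.startswith p.2 "* ")
    && PySem.Str.strip (PySem.Str.slice p.2 (some 2) none) ≠ ""

def parse_agents_md_py_alt (content : String) : List (String × List String) :=
  let lines := ((PySem.Str.split? content "\n").getD []).map PySem.Str.strip
  let labels := (lines.foldl pvB_labelStep ([], "all")).1
  let bullets := fun (sec : String) =>
    (labels.zip lines).foldl
      (fun out p => if pvB_isBullet sec p then out ++ [PySem.Str.strip (PySem.Str.slice p.2 (some 2) none)] else out)
      []
  let alls := bullets "all"
  [("build", alls ++ bullets "build"), ("plan", alls ++ bullets "plan"), ("all", alls)]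

-- ===== PRECONDITION & SPEC =====
def Spec_parse_agents_md_py (content : String) (out : List (String × List String)) : Prop := out = parse_agents_md_py_alt content
instance (content : String) (out : List (String × List String)) : Decidable (Spec_parse_agents_md_py content out) := by unfold Spec_parse_agents_md_py; infer_instance

-- ===== CLAIM (what is proved, stated in full; the proofs are below) =====
def Claim_equal_parse_agents_md_py : Prop := ∀ (content : String), Dom_parse_agents_md_py content → Spec_parse_agents_md_py content (parse_agents_md_py content)

-- ===== LEMMAS AND PROOFS =====

-- the instructions collected for section `sec` from the remaining lines, starting in section `cur`
def pvCollect (sec cur : String) : List String → List String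
  | [] => []
  | l0 :: ls =>
    let line := PySem.Str.strip l0
    if PySem.Str.startswith (PySem.Str.lower line) "## build" then pvCollect sec "build" ls
    else if PySem.Str.startswith (PySem.Str.lower line) "## plan" then pvCollect sec "plan" ls
    else if PySem.Str.startswith line "## " then pvCollect sec "all" ls
    else if PySem.Str.startswith line "- " || PySem.Str.startswith line "* " then
      if PySem.Str.strip (PySem.Str.slice line (some 2) none) ≠ "" then
        (if cur == sec then [PySem.Str.strip (PySem.Str.slice line (some 2) none)] else [])
          ++ pvCollect sec cur ls
      else pvCollect sec cur ls
    else pvCollect sec cur ls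

-- the per-line labels produced by B's first pass, starting in section `cur`
def pvLabels (cur : String) : List String → List (Option String)
  | [] => []
  | l :: ls =>
    if PySem.Str.startswith (PySem.Str.lower l) "## build" then none :: pvLabels "build" ls
    else if PySem.Str.startswith (PySem.Str.lower l) "## plan" then none :: pvLabels "plan" ls
    else if PySem.Str.startswith l "## " then none :: pvLabels "all" ls
    else some cur :: pvLabels cur ls

theorem pvLabels_fold (ls : List String) (acc : List (Option String)) (cur : String) :
    (ls.foldl pvB_labelStep (acc, cur)).1 = acc ++ pvLabels cur ls := by
  induction ls generalizing acc cur with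
  | nil => simp [pvLabels]
  | cons l ls ih =>
    simp only [List.foldl, pvB_labelStep, pvB_headerLabel, pvLabels]
    by_cases h1 : PySem.Str.startswith (PySem.Str.lower l) "## build" = true
    · simp only [if_pos h1]; simp [ih]
    · simp only [if_neg h1]
      by_cases h2 : PySem.Str.startswith (PySem.Str.lower l) "## plan" = true
      · simp only [if_pos h2]; simp [ih]
      · simp only [if_neg h2]
        by_cases h3 : PySem.Str.startswith l "## " = true
        · simp only [if_pos h3]; simp [ih]
        · simp only [if_neg h3]; simp [ih]

theorem pvB_isBullet_none (sec x : String) : pvB_isBullet sec (none, x) = false := by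
  simp [pvB_isBullet]

-- B's bullet pass over the labeled stripped lines is pvCollect
set_option maxHeartbeats 1600000 in
theorem pvB_bullets_eq (sec : String) (ls : List String) (cur : String) :
    ((pvLabels cur (ls.map PySem.Str.strip)).zip (ls.map PySem.Str.strip)).foldl
      (fun out p => if pvB_isBullet sec p then out ++ [PySem.Str.strip (PySem.Str.slice p.2 (some 2) none)] else out)
      []
    = pvCollect sec cur ls := by
  rw [PySem.List.foldl_append_if]
  rw [List.nil_append]
  induction ls generalizing cur with
  | nil => simp [pvLabels, pvCollect]
  | cons l ls ih =>
    simp only [List.map, pvCollect, pvLabels]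
    by_cases h1 : PySem.Str.startswith (PySem.Str.lower (PySem.Str.strip l)) "## build" = true
    · simp only [if_pos h1, List.zip_cons_cons, List.filter_cons, pvB_isBullet_none,
        Bool.false_eq_true, if_false]
      exact ih "build"
    · simp only [if_neg h1]
      by_cases h2 : PySem.Str.startswith (PySem.Str.lower (PySem.Str.strip l)) "## plan" = true
      · simp only [if_pos h2, List.zip_cons_cons, List.filter_cons, pvB_isBullet_none,
          Bool.false_eq_true, if_false]
        exact ih "plan"
      · simp only [if_neg h2]
        by_cases h3 : PySem.Str.startswith (PySem.Str.strip l) "## " = true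
        · simp only [if_pos h3, List.zip_cons_cons, List.filter_cons, pvB_isBullet_none,
            Bool.false_eq_true, if_false]
          exact ih "all"
        · simp only [if_neg h3, List.zip_cons_cons, List.filter_cons]
          have hval : pvB_isBullet sec (some cur, PySem.Str.strip l)
              = ((cur == sec) && (PySem.Str.startswith (PySem.Str.strip l) "- "
                  || PySem.Str.startswith (PySem.Str.strip l) "* ")
                 && decide (PySem.Str.strip (PySem.Str.slice (PySem.Str.strip l) (some 2) none) ≠ "")) := rfl
          by_cases hb : (PySem.Str.startswith (PySem.Str.strip l) "- "
              || PySem.Str.startswith (PySem.Str.strip l) "* ") = true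
          · by_cases hi : PySem.Str.strip (PySem.Str.slice (PySem.Str.strip l) (some 2) none) = ""
            · have hd : decide (PySem.Str.strip (PySem.Str.slice (PySem.Str.strip l) (some 2) none) ≠ "") = false := by
                simp [hi]
              rw [hval, hb, hd]
              simp only [Bool.and_false, Bool.false_eq_true, if_false]
              rw [if_neg (not_not_intro hi)]
              exact ih cur
            · have hd : decide (PySem.Str.strip (PySem.Str.slice (PySem.Str.strip l) (some 2) none) ≠ "") = true :=
                decide_eq_true hi
              by_cases hc : cur = sec
              · have hcs : (cur == sec) = true := beq_iff_eq.mpr hc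
                rw [hval, hb, hd, hcs]
                simp only [Bool.and_true, if_true, List.map_cons]
                rw [List.singleton_append, ih cur, if_pos hi]
              · have hcs : (cur == sec) = false := beq_eq_false_iff_ne.mpr hc
                rw [hval, hb, hd, hcs]
                simp only [Bool.false_and, Bool.false_eq_true, if_false]
                rw [ih cur, if_pos hi]
                simp only [List.nil_append, ite_self]
          · have hbf : (PySem.Str.startswith (PySem.Str.strip l) "- "
                || PySem.Str.startswith (PySem.Str.strip l) "* ") = false := by
              simpa using hb
            rw [hval, hbf]
            simp only [Bool.false_and, Bool.and_false, Bool.false_eq_true, if_false]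
            exact ih cur

theorem pvDict_modify_build (b p a : List String) (ins : String) :
    (PySem.Dict.mk [("build", b), ("plan", p), ("all", a)] : PySem.Dict String (List String)).modify
      "build" [] (· ++ [ins])
    = PySem.Dict.mk [("build", b ++ [ins]), ("plan", p), ("all", a)] := by
  simp [PySem.Dict.modify, PySem.Dict.insert, PySem.Dict.getD, PySem.Dict.get?,
    PySem.Dict.contains, List.find?]

theorem pvDict_modify_plan (b p a : List String) (ins : String) :
    (PySem.Dict.mk [("build", b), ("plan", p), ("all", a)] : PySem.Dict String (List String)).modify
      "plan" [] (· ++ [ins])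
    = PySem.Dict.mk [("build", b), ("plan", p ++ [ins]), ("all", a)] := by
  simp [PySem.Dict.modify, PySem.Dict.insert, PySem.Dict.getD, PySem.Dict.get?,
    PySem.Dict.contains, List.find?]

theorem pvDict_modify_all (b p a : List String) (ins : String) :
    (PySem.Dict.mk [("build", b), ("plan", p), ("all", a)] : PySem.Dict String (List String)).modify
      "all" [] (· ++ [ins])
    = PySem.Dict.mk [("build", b), ("plan", p), ("all", a ++ [ins])] := by
  simp [PySem.Dict.modify, PySem.Dict.insert, PySem.Dict.getD, PySem.Dict.get?,
    PySem.Dict.contains, List.find?]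

theorem pvA_fold (ls : List String) (cur : String) (b p a : List String)
    (hcur : cur = "build" ∨ cur = "plan" ∨ cur = "all") :
    (ls.foldl pvA_step (PySem.Dict.mk [("build", b), ("plan", p), ("all", a)], cur)).1
    = PySem.Dict.mk [("build", b ++ pvCollect "build" cur ls),
                     ("plan", p ++ pvCollect "plan" cur ls),
                     ("all", a ++ pvCollect "all" cur ls)] := by
  induction ls generalizing cur b p a with
  | nil => simp [pvCollect]
  | cons l ls ih =>
    simp only [List.foldl, pvA_step, pvCollect]
    by_cases h1 : PySem.Str.startswith (PySem.Str.lower (PySem.Str.strip l)) "## build" = true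
    · simp only [if_pos h1]; exact ih "build" b p a (Or.inl rfl)
    · simp only [if_neg h1]
      by_cases h2 : PySem.Str.startswith (PySem.Str.lower (PySem.Str.strip l)) "## plan" = true
      · simp only [if_pos h2]; exact ih "plan" b p a (Or.inr (Or.inl rfl))
      · simp only [if_neg h2]
        by_cases h3 : PySem.Str.startswith (PySem.Str.strip l) "## " = true
        · simp only [if_pos h3]; exact ih "all" b p a (Or.inr (Or.inr rfl))
        · simp only [if_neg h3]
          by_cases h4 : (PySem.Str.startswith (PySem.Str.strip l) "- "
              || PySem.Str.startswith (PySem.Str.strip l) "* ") = true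
          · simp only [if_pos h4]
            by_cases h5 : PySem.Str.strip (PySem.Str.slice (PySem.Str.strip l) (some 2) none) ≠ ""
            · simp only [if_pos h5]
              rcases hcur with hc | hc | hc <;> subst hc
              · rw [pvDict_modify_build]
                rw [ih "build" _ p a (Or.inl rfl)]
                simp [List.append_assoc]
              · rw [pvDict_modify_plan]
                rw [ih "plan" b _ a (Or.inr (Or.inl rfl))]
                simp [List.append_assoc]
              · rw [pvDict_modify_all]
                rw [ih "all" b p _ (Or.inr (Or.inr rfl))]
                simp [List.append_assoc]
            · simp only [if_neg h5]
              exact ih cur b p a hcur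
          · simp only [if_neg h4]
            exact ih cur b p a hcur

theorem parse_agents_md_py_eq (content : String) :
    parse_agents_md_py content = parse_agents_md_py_alt content := by
  unfold parse_agents_md_py parse_agents_md_py_alt
  simp only [pvLabels_fold _ [] "all", List.nil_append]
  rw [pvB_bullets_eq "all", pvB_bullets_eq "build", pvB_bullets_eq "plan"]
  have h := pvA_fold ((PySem.Str.split? content "\n").getD []) "all" [] [] [] (by simp)
  have hinit : (PySem.Dict.ofList [("build", ([] : List String)), ("plan", []), ("all", [])])
      = PySem.Dict.mk [("build", []), ("plan", []), ("all", [])] := rfl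
  rw [hinit, h]
  simp [PySem.Dict.insert, PySem.Dict.getD, PySem.Dict.get?, PySem.Dict.contains]

-- ===== VERDICT (by name: the statement is the Claim_ definition above) =====
theorem parse_agents_md_py_spec : Claim_equal_parse_agents_md_py := by
  intro content _
  unfold Spec_parse_agents_md_py
  exact parse_agents_md_py_eq content
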